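-- pv_equiv track=rewrite | github.com/carelb/OAS3-Tools | compile_http_errors_from_oas.py | group_by_status
-- ===== SOURCE A (Python) =====
-- from typing import Dict, Any, List, Tuple, Optional
--
-- def sort_rows(rows: List[Dict[str, str]]) -> List[Dict[str, str]]:
--     def sort_key(r: Dict[str, str]) -> Tuple[int, str, str, str]:
--         status = r.get("Status", "")
--         try:
--             status_num = int(status)
--         except:
--             status_num = 10**9
--         return (status_num, status, r.get("ErrorCode", ""), r.get("Description", ""))
--
--     return sorted(rows, key=sort_key)
--
-- def group_by_status(rows: List[Dict[str, str]]) -> List[Dict[str, str]]: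
--     """
--     Collapse to one row per status:
--       - ErrorCode: comma-separated unique codes
--       - Description: semicolon-separated unique descriptions
--       - EnumValues: comma-separated unique enum values
--     """
--     buckets: Dict[str, Dict[str, Any]] = {}
--     for r in rows:
--         s = r.get("Status", "")
--         b = buckets.setdefault(s, {"codes": set(), "descs": set(), "enums": set()})
--         if r.get("ErrorCode"):
--             b["codes"].add(r["ErrorCode"])
--         if r.get("Description"):
--             b["descs"].add(r["Description"])
--         if r.get("EnumValues"):
--             for v in [x.strip() for x in r["EnumValues"].split(",") if x.strip()]:
--                 b["enums"].add(v)
--     out: List[Dict[str, str]] = []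
--     for s, agg in buckets.items():
--         # sort codes/enums numerically when possible, then lexicographically
--         def smart_sort(values: List[str]) -> List[str]:
--             nums, strs = [], []
--             for v in values:
--                 try:
--                     nums.append(int(v))
--                 except:
--                     strs.append(v)
--             return [str(n) for n in sorted(nums)] + sorted(strs)
--
--         codes = smart_sort(list(agg["codes"]))
--         enums = smart_sort(list(agg["enums"]))
--         descs = sorted(agg["descs"])
--         out.append(
--             {
--                 "Status": s,
--                 "ErrorCode": ", ".join(codes),
--                 "Description": "; ".join(descs),
--                 "EnumValues": ", ".join(enums),
--             }
--         )
--     # final sort by status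
--     return sort_rows(out)
-- ===== SOURCE B (Python) =====
-- from typing import Dict, List, Tuple
--
-- def sort_rows(rows: List[Dict[str, str]]) -> List[Dict[str, str]]:
--     def sort_key(r: Dict[str, str]) -> Tuple[int, str, str, str]:
--         status = r.get("Status", "")
--         try:
--             status_num = int(status)
--         except:
--             status_num = 10**9
--         return (status_num, status, r.get("ErrorCode", ""), r.get("Description", ""))
--     return sorted(rows, key=sort_key)
--
-- def smart_sort(values: List[str]) -> List[str]:
--     nums, strs = [], []
--     for v in values:
--         try:
--             nums.append(int(v))
--         except:
--             strs.append(v)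
--     return [str(n) for n in sorted(nums)] + sorted(strs)
--
-- def group_by_status(rows: List[Dict[str, str]]) -> List[Dict[str, str]]:
--     # No hash buckets: collect the distinct statuses in first-seen order,
--     # then aggregate each status by a dedicated scan over the rows.
--     order: List[str] = []
--     for r in rows:
--         s = r.get("Status", "")
--         if s not in order:
--             order.append(s)
--     out: List[Dict[str, str]] = []
--     for s in order:
--         codes: List[str] = []
--         descs: List[str] = []
--         enums: List[str] = []
--         for r in rows:
--             if r.get("Status", "") != s:
--                 continue
--             c = r.get("ErrorCode")
--             if c and c not in codes:
--                 codes.append(c)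
--             d = r.get("Description")
--             if d and d not in descs:
--                 descs.append(d)
--             e = r.get("EnumValues")
--             if e:
--                 for v in (x.strip() for x in e.split(",")):
--                     if v and v not in enums:
--                         enums.append(v)
--         out.append({
--             "Status": s,
--             "ErrorCode": ", ".join(smart_sort(codes)),
--             "Description": "; ".join(sorted(descs)),
--             "EnumValues": ", ".join(smart_sort(enums)),
--         })
--     return sort_rows(out)
-- ===== Notes on version B (the rewrite author's own statement) =====
-- stated objective: alternative
-- what changed: Replaces A's single-pass dict-of-sets bucketing with a first-seen distinct-status list followed by one dedicated aggregation scan of the rows per status (plain lists with membership checks; no dict, no sets).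
import Mathlib
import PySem

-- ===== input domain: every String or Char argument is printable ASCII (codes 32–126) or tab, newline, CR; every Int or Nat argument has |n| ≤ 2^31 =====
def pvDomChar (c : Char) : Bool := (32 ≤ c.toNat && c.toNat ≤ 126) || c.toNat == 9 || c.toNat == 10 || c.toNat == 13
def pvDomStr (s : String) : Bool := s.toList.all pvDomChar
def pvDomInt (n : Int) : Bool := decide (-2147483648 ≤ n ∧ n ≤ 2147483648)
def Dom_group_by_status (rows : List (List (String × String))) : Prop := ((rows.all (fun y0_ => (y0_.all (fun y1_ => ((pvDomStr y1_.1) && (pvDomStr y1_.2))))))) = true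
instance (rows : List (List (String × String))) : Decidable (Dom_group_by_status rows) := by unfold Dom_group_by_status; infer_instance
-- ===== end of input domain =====

-- B replaces A's one-pass dict-of-sets bucketing by a distinct-status list plus a
-- per-status aggregation scan over the rows (no dict, no sets); objective: alternative.

-- shared helpers (both Pythons contain the identical sort_rows / smart_sort / row
-- formatting code; ported once and used by both ports)
-- r.get(k, d) on a row: first matching key of the association list
def pvRowGet (r : List (String × String)) (k : String) : Option String :=
  (r.find? (fun p => p.1 == k)).map (fun p => p.2)

def pvRowGetD (r : List (String × String)) (k : String) (d : String) : String :=
  (pvRowGet r k).getD d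

def pvSmartSort (values : List String) : List String :=
  let p := values.foldl (fun (acc : List Int × List String) v =>
      match PySem.Int.ofStr? v with
      | some n => (acc.1 ++ [n], acc.2)
      | none => (acc.1, acc.2 ++ [v])) ([], [])
  (PySem.List.sorted p.1 (fun n => n)).map PySem.Int.toStr ++ PySem.List.sorted p.2 (fun s => s)

def pvSortKey (r : List (String × String)) : Int × String × String × String :=
  ((match PySem.Int.ofStr? (pvRowGetD r "Status" "") with
    | some n => n
    | none => 1000000000),
   pvRowGetD r "Status" "", pvRowGetD r "ErrorCode" "", pvRowGetD r "Description" "")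

-- Python's tuple '<': lexicographic, decided at the first unequal component (exact)
def pvKeyLt (a b : Int × String × String × String) : Bool :=
  if a.1 ≠ b.1 then decide (a.1 < b.1)
  else if a.2.1 ≠ b.2.1 then decide (a.2.1 < b.2.1)
  else if a.2.2.1 ≠ b.2.2.1 then decide (a.2.2.1 < b.2.2.1)
  else decide (a.2.2.2 < b.2.2.2)

-- sorted(rows, key=sort_key): PySem's stable insertion sort (the shape of
-- PySem.List.sorted_eq_foldl_insertBy) with the explicit tuple comparison; exact
def pvSortRows (rows : List (List (String × String))) : List (List (String × String)) :=
  rows.foldl (fun acc r => PySem.List.insertBy (fun x y => pvKeyLt (pvSortKey x) (pvSortKey y)) r acc) []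

def pvMkRow (s : String) (agg : List String × List String × List String) : List (String × String) :=
  [("Status", s),
   ("ErrorCode", PySem.Str.join ", " (pvSmartSort agg.1)),
   ("Description", PySem.Str.join "; " (PySem.List.sorted agg.2.1 (fun x => x))),
   ("EnumValues", PySem.Str.join ", " (pvSmartSort agg.2.2))]

-- ===== PORT A =====
-- one row of A's bucket-update: add code / description / enum tokens to the three sets
def pvBucketAdd (r : List (String × String)) (b : List String × List String × List String) :
    List String × List String × List String :=
  let codes := match pvRowGet r "ErrorCode" with
    | some c => if c ≠ "" then PySem.Set.add b.1 c else b.1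
    | none => b.1
  let descs := match pvRowGet r "Description" with
    | some dsc => if dsc ≠ "" then PySem.Set.add b.2.1 dsc else b.2.1
    | none => b.2.1
  let enums := match pvRowGet r "EnumValues" with
    | some e => if e ≠ "" then
        ((((PySem.Str.split? e ",").getD []).map PySem.Str.strip).filter
          (fun v => v ≠ "")).foldl PySem.Set.add b.2.2
      else b.2.2
    | none => b.2.2
  (codes, descs, enums)

def group_by_status (rows : List (List (String × String))) : List (List (String × String)) :=
  let buckets := rows.foldl
    (fun d r => d.insert (pvRowGetD r "Status" "")
        (pvBucketAdd r (d.getD (pvRowGetD r "Status" "") ([], [], []))))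
    (PySem.Dict.empty : PySem.Dict String (List String × List String × List String))
  pvSortRows (buckets.items.map (fun p => pvMkRow p.1 p.2))

-- ===== PORT B =====
-- 'if v not in l: l.append(v)' on a plain list
def pvListAdd (l : List String) (v : String) : List String :=
  if l.contains v then l else l ++ [v]

def pvAltStep (r : List (String × String)) (acc : List String × List String × List String) :
    List String × List String × List String :=
  let codes := match pvRowGet r "ErrorCode" with
    | some c => if c ≠ "" then pvListAdd acc.1 c else acc.1
    | none => acc.1
  let descs := match pvRowGet r "Description" with
    | some dsc => if dsc ≠ "" then pvListAdd acc.2.1 dsc else acc.2.1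
    | none => acc.2.1
  let enums := match pvRowGet r "EnumValues" with
    | some e => if e ≠ "" then
        ((PySem.Str.split? e ",").getD []).foldl
          (fun l x => if PySem.Str.strip x ≠ "" then pvListAdd l (PySem.Str.strip x) else l) acc.2.2
      else acc.2.2
    | none => acc.2.2
  (codes, descs, enums)

-- one dedicated scan over the rows for status s
def pvCollect (s : String) (rows : List (List (String × String))) :
    List String × List String × List String :=
  rows.foldl (fun acc r => if pvRowGetD r "Status" "" = s then pvAltStep r acc else acc) ([], [], [])

def group_by_status_alt (rows : List (List (String × String))) : List (List (String × String)) :=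
  let order := rows.foldl
    (fun acc r => if acc.contains (pvRowGetD r "Status" "") then acc
                  else acc ++ [pvRowGetD r "Status" ""]) []
  pvSortRows (order.map (fun s => pvMkRow s (pvCollect s rows)))

-- ===== PRECONDITION & SPEC =====
def Spec_group_by_status (rows : List (List (String × String))) (out : List (List (String × String))) : Prop := out = group_by_status_alt rows
instance (rows : List (List (String × String))) (out : List (List (String × String))) : Decidable (Spec_group_by_status rows out) := by unfold Spec_group_by_status; infer_instance

-- ===== CLAIM (what is proved, stated in full; the proofs are below) =====
def Claim_equal_group_by_status : Prop := ∀ (rows : List (List (String × String))), Dom_group_by_status rows → Spec_group_by_status rows (group_by_status rows)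

-- ===== LEMMAS AND PROOFS =====

-- B's per-row update is A's bucket update (list-with-membership = set add)
theorem pvAltStep_eq_pvBucketAdd (r : List (String × String))
    (b : List String × List String × List String) : pvAltStep r b = pvBucketAdd r b := by
  unfold pvAltStep pvBucketAdd
  cases h : pvRowGet r "EnumValues" with
  | none => rfl
  | some e =>
    simp only []
    congr 2
    by_cases he : e = ""
    · simp [he]
    · simp only [he, ne_eq, not_false_iff, if_pos]
      rw [List.foldl_filter, List.foldl_map]
      apply PySem.List.foldl_congr_mem
      intro acc x _
      by_cases hx : PySem.Str.strip x = "" <;>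
        simp [hx, pvListAdd, PySem.Set.add, PySem.Set.contains]

-- looking up one key after A's grouping fold = folding the update over the rows
-- whose status is that key (the bucket of s, characterised without the dict)
theorem pv_getD_grouping_foldl {ν : Type} (e : ν) (key : List (String × String) → String)
    (upd : List (String × String) → ν → ν) (l : List (List (String × String)))
    (d : PySem.Dict String ν) (s : String) :
    (l.foldl (fun d r => d.insert (key r) (upd r (d.getD (key r) e))) d).getD s e
      = l.foldl (fun b r => if key r = s then upd r b else b) (d.getD s e) := by
  induction l generalizing d with
  | nil => rfl
  | cons r t ih =>
    simp only [List.foldl_cons, ih]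
    by_cases h : key r = s
    · rw [PySem.Dict.getD_insert]
      simp [h]
    · rw [PySem.Dict.getD_insert]
      simp [h, Ne.symm h]

-- B's first-seen status list is the key list of A's dict
theorem pv_order_eq_keys {ν : Type} (f : PySem.Dict String ν → List (String × String) → ν)
    (rows : List (List (String × String))) :
    (rows.foldl (fun d r => d.insert (pvRowGetD r "Status" "") (f d r))
        (PySem.Dict.empty : PySem.Dict String ν)).keys
    = rows.foldl (fun acc r => if acc.contains (pvRowGetD r "Status" "") then acc
                  else acc ++ [pvRowGetD r "Status" ""]) [] := by
  rw [PySem.Dict.keys_foldl_insert_key rows (fun r => pvRowGetD r "Status" "") f]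
  rw [PySem.Dict.keys_empty]
  show PySem.Set.update [] (rows.map fun r => pvRowGetD r "Status" "") = _
  rw [PySem.Set.update, List.foldl_map]
  rfl

-- ===== VERDICT (by name: the statement is the Claim_ definition above) =====
theorem group_by_status_spec : Claim_equal_group_by_status := by
  intro rows _
  unfold Spec_group_by_status
  unfold group_by_status group_by_status_alt
  simp only []
  congr 1
  rw [PySem.Dict.items_eq_map_keys _
        (PySem.Dict.nodup_keys_foldl_insert_key rows (fun r => pvRowGetD r "Status" "") _ _
          PySem.Dict.nodup_keys_empty) ([], [], [])]
  rw [List.map_map, pv_order_eq_keys]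
  apply List.map_congr_left
  intro s _
  simp only [Function.comp]
  congr 1
  rw [pv_getD_grouping_foldl]
  unfold pvCollect
  rw [PySem.Dict.getD_empty]
  apply PySem.List.foldl_congr_mem
  intro b r _
  by_cases h : pvRowGetD r "Status" "" = s <;> simp [h, pvAltStep_eq_pvBucketAdd]
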